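-- pv_equiv track=rewrite | github.com/dataliszt/AlgoSolving | programmers/사전순부분문자열.py | solution
-- ===== SOURCE A (Python) =====
-- def solution(s):
--     sub_string = ""
--
--     while s:
--         biggest_char = ""
--         biggest_idx = 0
--         for idx, ele in enumerate(s):
--             if ele > biggest_char:
--                 biggest_char = ele
--                 biggest_idx = idx
--
--         sub_string += biggest_char
--         s = s[biggest_idx + 1: ]
--     return sub_string
-- ===== SOURCE B (Python) =====
-- def solution(s):
--     out = []
--     mx = ""
--     for c in reversed(s):
--         if c >= mx:
--             mx = c
--             out.append(c)
--     return "".join(reversed(out))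
-- ===== Notes on version B (the rewrite author's own statement) =====
-- stated objective: faster
-- what changed: Replaced the repeated find-first-maximum-then-cut-prefix loop (quadratic) by a single right-to-left pass that keeps the running maximum and collects every character >= it, then reverses the collected characters.
import Mathlib
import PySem

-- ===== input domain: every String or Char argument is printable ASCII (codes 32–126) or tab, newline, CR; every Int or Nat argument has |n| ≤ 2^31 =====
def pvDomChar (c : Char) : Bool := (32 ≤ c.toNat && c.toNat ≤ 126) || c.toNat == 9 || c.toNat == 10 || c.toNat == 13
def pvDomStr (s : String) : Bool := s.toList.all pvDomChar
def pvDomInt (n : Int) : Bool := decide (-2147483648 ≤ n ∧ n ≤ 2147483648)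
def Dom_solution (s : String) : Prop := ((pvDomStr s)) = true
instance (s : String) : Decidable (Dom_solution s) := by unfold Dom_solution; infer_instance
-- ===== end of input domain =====

-- B replaces A's repeated find-first-maximum-then-cut loop by one right-to-left pass
-- keeping the running maximum (objective: faster).

-- ===== PORT A =====
-- inner 'for idx, ele in enumerate(s)' loop of A: state (biggest_char, biggest_idx) plus the
-- running index; biggest_char = "" is modelled as 'none' (every char beats it, as in Python).
def findBigLoop : List Char → (Option Char × Nat) → Nat → Option Char × Nat
  | [], st, _ => st
  | c :: t, (bc, bi), idx =>
      if (match bc with | none => true | some b => decide (b < c)) then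
        findBigLoop t (some c, idx) (idx + 1)
      else
        findBigLoop t (bc, bi) (idx + 1)

-- the outer 'while s:' loop of A, over the list of characters
def solLoopA : List Char → List Char
  | [] => []
  | c :: t =>
      match findBigLoop (c :: t) (none, 0) 0 with
      | (none, _) => []   -- unreachable: on a nonempty list the first char always beats ""
      | (some m, bi) => m :: solLoopA ((c :: t).drop (bi + 1))
termination_by l => l.length
decreasing_by simp [List.length_drop]

def solution (s : String) : String := String.mk (solLoopA s.toList)

-- ===== PORT B =====
-- single pass over reversed(s): state (mx, out); mx = "" modelled as 'none'
def solution_alt (s : String) : String :=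
  let st := s.toList.reverse.foldl
    (fun (st : Option Char × List Char) c =>
      if (match st.1 with | none => true | some m => decide (m ≤ c)) then (some c, st.2 ++ [c])
      else st)
    (none, [])
  String.mk st.2.reverse

-- ===== PRECONDITION & SPEC =====
def Spec_solution (s : String) (out : String) : Prop := out = solution_alt s
instance (s : String) (out : String) : Decidable (Spec_solution s out) := by unfold Spec_solution; infer_instance

-- ===== CLAIM (what is proved, stated in full; the proofs are below) =====
def Claim_equal_solution : Prop := ∀ (s : String), Dom_solution s → Spec_solution s (solution s)

-- ===== LEMMAS AND PROOFS =====

-- maximum of a list of chars (spec-side helper)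
def Mx : List Char → Option Char
  | [] => none
  | c :: t => some (match Mx t with | none => c | some m => max c m)

-- common specification both loops are proved equal to
def g : List Char → List Char
  | [] => []
  | c :: t =>
      match Mx t with
      | none => c :: g t
      | some m => if m ≤ c then c :: g t else g t

lemma Mx_none_iff (l : List Char) : Mx l = none ↔ l = [] := by
  cases l <;> simp [Mx]

lemma le_Mx {l : List Char} {m x : Char} (h : Mx l = some m) (hx : x ∈ l) : x ≤ m := by
  induction l generalizing m with
  | nil => cases hx
  | cons c t ih =>
    simp only [Mx, Option.some.injEq] at h
    cases ht : Mx t with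
    | none =>
      simp [ht] at h
      have : t = [] := (Mx_none_iff t).mp ht
      subst this
      simp at hx
      simp [hx, ← h]
    | some m' =>
      simp [ht] at h
      rcases List.mem_cons.mp hx with rfl | hx'
      · rw [← h]; exact le_max_left _ _
      · rw [← h]; exact le_trans (ih ht hx') (le_max_right _ _)

-- L1: if nothing in t beats b, the fold returns the start state
lemma findBig_noBeat (t : List Char) (b : Char) : ∀ (i k : Nat),
    (∀ x ∈ t, ¬ b < x) → findBigLoop t (some b, i) k = (some b, i) := by
  induction t with
  | nil => intro i k _; rfl
  | cons c t ih =>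
    intro i k h
    have hc : ¬ b < c := h c (List.mem_cons_self ..)
    simp only [findBigLoop, hc, decide_false, Bool.false_eq_true, if_false]
    exact ih i (k + 1) (fun x hx => h x (List.mem_cons_of_mem _ hx))

-- L2: if both start chars are strictly below the max of t, the start state is irrelevant
lemma findBig_beat (t : List Char) (m : Char) (hm : Mx t = some m)
    (b b' : Char) (i i' k : Nat) (hb : b < m) (hb' : b' < m) :
    findBigLoop t (some b, i) k = findBigLoop t (some b', i') k := by
  induction t generalizing m b b' i i' k with
  | nil => simp [Mx] at hm
  | cons c t ih =>
    simp only [Mx, Option.some.injEq] at hm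
    by_cases h1 : b < c <;> by_cases h2 : b' < c <;>
      simp only [findBigLoop, h1, h2, decide_true, decide_false, if_true, if_false,
        Bool.false_eq_true]
    · -- b < c, c ≤ b'
      cases ht : Mx t with
      | none => exfalso; simp [ht] at hm; subst hm; exact h2 hb'
      | some m' =>
        simp [ht] at hm; subst hm
        have hcb' : c ≤ b' := not_lt.mp h2
        have hmm' : max c m' = m' := by
          cases max_choice c m' with
          | inl h => exfalso; rw [h] at hb'; exact h2 hb'
          | inr h => exact h
        rw [hmm'] at hb hb'
        exact ih m' ht c b' k i' (k + 1) (lt_of_le_of_lt hcb' hb') hb'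
    · -- c ≤ b, b' < c
      cases ht : Mx t with
      | none => exfalso; simp [ht] at hm; subst hm; exact h1 hb
      | some m' =>
        simp [ht] at hm; subst hm
        have hcb : c ≤ b := not_lt.mp h1
        have hmm' : max c m' = m' := by
          cases max_choice c m' with
          | inl h => exfalso; rw [h] at hb; exact h1 hb
          | inr h => exact h
        rw [hmm'] at hb hb'
        exact ih m' ht b c i k (k + 1) hb (lt_of_le_of_lt hcb hb)
    · -- c ≤ b, c ≤ b'
      cases ht : Mx t with
      | none => exfalso; simp [ht] at hm; subst hm; exact h1 hb
      | some m' =>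
        simp [ht] at hm; subst hm
        have hmm' : max c m' = m' := by
          cases max_choice c m' with
          | inl h => exfalso; rw [h] at hb; exact h1 hb
          | inr h => exact h
        rw [hmm'] at hb hb'
        exact ih m' ht b b' i i' (k + 1) hb hb'

-- L3: shifting both the stored index and the counter
lemma findBig_shift (t : List Char) (b : Char) (i k d : Nat) :
    findBigLoop t (some b, i + d) (k + d) =
      ((findBigLoop t (some b, i) k).1, (findBigLoop t (some b, i) k).2 + d) := by
  induction t generalizing b i k with
  | nil => rfl
  | cons c t ih =>
    by_cases h : b < c <;>
      simp only [findBigLoop, h, decide_true, decide_false, if_true, if_false,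
        Bool.false_eq_true]
    · have e : k + d + 1 = (k + 1) + d := by omega
      rw [e, ih c k (k + 1)]
    · have e : k + d + 1 = (k + 1) + d := by omega
      rw [e, ih b i (k + 1)]

-- L4: starting from 'some', the result is 'some'
lemma findBig_isSome (t : List Char) (b : Char) (i k : Nat) :
    (findBigLoop t (some b, i) k).1.isSome := by
  induction t generalizing b i k with
  | nil => rfl
  | cons c t ih =>
    by_cases h : b < c <;>
      simp only [findBigLoop, h, decide_true, decide_false, if_true, if_false,
        Bool.false_eq_true]
    · exact ih c k (k + 1)
    · exact ih b i (k + 1)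

lemma solLoopA_nil : solLoopA [] = [] := by rw [solLoopA.eq_def]

lemma solLoopA_cons (c : Char) (t : List Char) :
    solLoopA (c :: t) = (match findBigLoop (c :: t) (none, 0) 0 with
      | (none, _) => []
      | (some m, bi) => m :: solLoopA ((c :: t).drop (bi + 1))) := by
  rw [solLoopA.eq_def]

-- in the 'c < max t' case, prepending c only shifts the found index by one
lemma findBig_cons_shift (t : List Char) (m c : Char) (hm : Mx t = some m) (hc : c < m) :
    findBigLoop t (some c, 0) 1 =
      ((findBigLoop t (none, 0) 0).1, (findBigLoop t (none, 0) 0).2 + 1) := by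
  cases t with
  | nil => simp [Mx] at hm
  | cons d t' =>
    have hstep : findBigLoop (d :: t') (none, 0) 0 = findBigLoop t' (some d, 0) 1 := by
      simp [findBigLoop]
    rw [hstep]
    by_cases h1 : c < d
    · have : findBigLoop (d :: t') (some c, 0) 1 = findBigLoop t' (some d, 1) 2 := by
        simp [findBigLoop, h1]
      rw [this]
      have := findBig_shift t' d 0 1 1
      simpa using this
    · -- d ≤ c < m, so Mx t' = some m and both c, d are beaten inside t'
      have hdc : d ≤ c := not_lt.mp h1
      simp only [Mx, Option.some.injEq] at hm
      cases ht' : Mx t' with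
      | none => exfalso; simp [ht'] at hm; subst hm; exact h1 hc
      | some m' =>
        simp [ht'] at hm; subst hm
        have hmm' : max d m' = m' := by
          cases max_choice d m' with
          | inl h => exfalso; rw [h] at hc; exact h1 hc
          | inr h => exact h
        rw [hmm'] at hc
        have hdm' : d < m' := lt_of_le_of_lt hdc hc
        have : findBigLoop (d :: t') (some c, 0) 1 = findBigLoop t' (some c, 0) 2 := by
          simp [findBigLoop, h1]
        rw [this, findBig_beat t' m' ht' c d 0 1 2 hc hdm']
        have := findBig_shift t' d 0 1 1
        simpa using this

-- A's loop equals the spec g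
lemma solLoopA_eq_g : ∀ l : List Char, solLoopA l = g l := by
  have main : ∀ n (l : List Char), l.length ≤ n → solLoopA l = g l := by
    intro n
    induction n with
    | zero =>
      intro l h
      have : l = [] := List.length_eq_zero_iff.mp (Nat.le_zero.mp h)
      subst this; rw [solLoopA_nil]; rfl
    | succ n ih =>
      intro l h
      cases l with
      | nil => rw [solLoopA_nil]; rfl
      | cons c t =>
        have hlen : t.length ≤ n := by simpa using h
        have hstep : findBigLoop (c :: t) (none, 0) 0 = findBigLoop t (some c, 0) 1 := by
          simp [findBigLoop]
        cases ht : Mx t with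
        | none =>
          have : t = [] := (Mx_none_iff t).mp ht
          subst this
          rw [solLoopA_cons, hstep]
          simp [findBigLoop, solLoopA_nil, g, Mx]
        | some m =>
          by_cases hmc : m ≤ c
          · -- c is the first maximum: A keeps c and continues on t
            have hnb : findBigLoop t (some c, 0) 1 = (some c, 0) :=
              findBig_noBeat t c 0 1 (fun x hx => not_lt.mpr (le_trans (le_Mx ht hx) hmc))
            rw [solLoopA_cons, hstep, hnb]
            simp only [List.drop_succ_cons, List.drop_zero]
            rw [ih t hlen]
            simp [g, ht, hmc]
          · -- c < m: A's step returns the same head as on t, index shifted by one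
            have hcm : c < m := not_le.mp hmc
            have hshift := findBig_cons_shift t m c ht hcm
            cases t with
            | nil => simp [Mx] at ht
            | cons d t' =>
              obtain ⟨m₀, hm₀⟩ : ∃ m₀, (findBigLoop (d :: t') (none, 0) 0).1 = some m₀ := by
                have hs : findBigLoop (d :: t') (none, 0) 0 = findBigLoop t' (some d, 0) 1 := by
                  simp [findBigLoop]
                rw [hs]
                exact Option.isSome_iff_exists.mp (findBig_isSome t' d 0 1)
              have hA : solLoopA (c :: d :: t') = solLoopA (d :: t') := by
                rw [solLoopA_cons, hstep, hshift]
                conv_rhs => rw [solLoopA_cons]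
                cases hfb : findBigLoop (d :: t') (none, 0) 0 with
                | mk fst snd =>
                  rw [hfb] at hm₀
                  simp only at hm₀
                  subst hm₀
                  simp [List.drop_succ_cons]
              rw [hA, ih (d :: t') hlen]
              simp [g, ht, hmc]
  exact fun l => main l.length l le_rfl

-- B's fold characterised
lemma alt_eq_g (l : List Char) :
    (l.foldr
      (fun c (st : Option Char × List Char) =>
        if (match st.1 with | none => true | some m => decide (m ≤ c)) then (some c, st.2 ++ [c])
        else st)
      (none, [])) = (Mx l, (g l).reverse) := by
  induction l with
  | nil => rfl
  | cons c t ih =>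
    simp only [List.foldr, ih]
    cases ht : Mx t with
    | none =>
      have : t = [] := (Mx_none_iff t).mp ht
      subst this
      simp [Mx, g]
    | some m =>
      by_cases h : m ≤ c
      · simp [h, Mx, g, ht]
      · simp [h, Mx, g, ht, max_eq_right (le_of_lt (not_le.mp h))]

-- ===== VERDICT (by name: the statement is the Claim_ definition above) =====
theorem solution_spec : Claim_equal_solution := by
  intro s _
  unfold Spec_solution solution solution_alt
  rw [List.foldl_reverse]
  have := alt_eq_g s.toList
  simp only [this]
  rw [List.reverse_reverse, solLoopA_eq_g]
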